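-- pv_equiv track=rewrite | github.com/cailllev/Chic | main.py | get_final_combinations
-- ===== SOURCE A (Python) =====
-- from itertools import combinations_with_replacement, product
--
-- dice_vals = list(range(1, 7))
--
-- dice = 3
--
-- def get_all_throws(dice_count) -> list[list]:
--     return [list(c) for c in product(dice_vals, repeat=dice_count)]
--
-- def re_add_ones(throws, dice_count):
--     """
--     [[2, 3], [4], [6, 6]] -> [[1, 2, 3], [1, 1, 4], [1, 6, 6]]
--     """
--     for t in throws:
--         t.extend([1] * (dice_count - len(t)))
--
-- def get_final_combinations(dice_stats: list) -> dict:
--     # combinations_with_replacement('ABCD', 2) -> AA AB AC AD BB BC BD CC CD DD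
--     possible_throws = combinations_with_replacement(dice_vals, dice)
--     count_combinations = {t: 0 for t in possible_throws}
--
--     for dice_count, comb_counts in enumerate(dice_stats):
--         curr_combinations = get_all_throws(dice_count)
--         re_add_ones(curr_combinations, dice)
--         for c in curr_combinations:
--             c.sort()  # [5, 1, 2] -> [1, 2, 5] the same throw
--             count_combinations[tuple(c)] += comb_counts
--     return count_combinations
-- ===== SOURCE B (Python) =====
-- from itertools import combinations_with_replacement
--
-- dice_vals = list(range(1, 7))
--
-- dice = 3
--
-- def _fact(n):
--     r = 1
--     for i in range(2, n + 1):
--         r *= i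
--     return r
--
-- def get_final_combinations(dice_stats: list) -> dict:
--     count_combinations = {t: 0 for t in combinations_with_replacement(dice_vals, dice)}
--     for dice_count, comb_counts in enumerate(dice_stats):
--         for throw in combinations_with_replacement(dice_vals, dice_count):
--             perms = _fact(dice_count)
--             for v in dict.fromkeys(throw):
--                 perms //= _fact(throw.count(v))
--             key = tuple(sorted(list(throw) + [1] * (dice - dice_count)))
--             count_combinations[key] += comb_counts * perms
--     return count_combinations
-- ===== Notes on version B (the rewrite author's own statement) =====
-- stated objective: faster
-- what changed: Instead of enumerating all 6^k ordered throws and sorting each one, B iterates only the distinct sorted throws from combinations_with_replacement and adds comb_counts times the multinomial number of orderings of each throw.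
import Mathlib
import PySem

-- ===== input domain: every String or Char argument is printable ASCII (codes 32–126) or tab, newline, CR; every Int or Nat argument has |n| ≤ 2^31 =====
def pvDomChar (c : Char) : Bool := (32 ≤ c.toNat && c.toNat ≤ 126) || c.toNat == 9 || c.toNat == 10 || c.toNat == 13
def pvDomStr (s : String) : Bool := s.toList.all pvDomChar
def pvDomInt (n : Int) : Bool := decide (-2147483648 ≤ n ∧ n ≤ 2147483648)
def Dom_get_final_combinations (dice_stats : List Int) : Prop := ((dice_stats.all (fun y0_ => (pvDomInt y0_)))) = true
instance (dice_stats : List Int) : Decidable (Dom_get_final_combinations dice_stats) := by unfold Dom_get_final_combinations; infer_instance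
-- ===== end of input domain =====

-- B replaces A's enumerate-all-6^k-orderings-and-sort loop by a loop over the distinct
-- sorted throws (combinations_with_replacement) weighted by their multinomial number of
-- orderings; objective: faster (6^k vs C(k+5,k) inner iterations). Equivalence is about
-- the returned dict; A mutates nothing observable.

-- module constant dice_vals = list(range(1, 7))
def pvDiceVals : List Int := [1, 2, 3, 4, 5, 6]
-- module constant dice = 3
def pvDice : Nat := 3

-- itertools.product(vals, repeat=k), in itertools order (first coordinate slowest)
def pvProduct (vals : List Int) : Nat → List (List Int)
  | 0 => [[]]
  | k + 1 => vals.flatMap (fun v => (pvProduct vals k).map (fun t => v :: t))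

-- itertools.combinations_with_replacement(vals, k), in itertools (lexicographic) order
-- (structural on k: cwr(v::vs, k+1) = map (v::) (cwr (v::vs) k) ++ cwr vs (k+1), unrolled over tails)
def pvCWRAux : Nat → List Int → List (List Int)
  | 0, _ => [[]]
  | k + 1, vals =>
      vals.tails.flatMap (fun t =>
        match t with
        | [] => []
        | v :: vs => (pvCWRAux k (v :: vs)).map (fun u => v :: u))

def pvCWR (vals : List Int) (k : Nat) : List (List Int) := pvCWRAux k vals

-- 'd[t] += c' : lookup then overwrite; on a missing key Python raises KeyError — that
-- case (the none branch, which leaves d unchanged) is excluded by Pre_.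
def pvBump (d : PySem.Dict (List Int) Int) (t : List Int) (c : Int) : PySem.Dict (List Int) Int :=
  match d.get? t with
  | some v => d.insert t (v + c)
  | none => d

-- ===== PORT A =====
def get_all_throws (dice_count : Nat) : List (List Int) :=
  pvProduct pvDiceVals dice_count

def re_add_ones (throws : List (List Int)) (dice_count : Nat) : List (List Int) :=
  throws.map (fun t => t ++ List.replicate (dice_count - t.length) 1)

def get_final_combinations (dice_stats : List Int) : List (List Int × Int) :=
  let count_combinations : PySem.Dict (List Int) Int :=
    (pvCWR pvDiceVals pvDice).foldl (fun d t => d.insert t 0) PySem.Dict.empty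
  ((PySem.List.enumerate dice_stats).foldl
      (fun d p =>
        (re_add_ones (get_all_throws p.1.toNat) pvDice).foldl
          (fun d c => pvBump d (PySem.List.sorted c (fun x => x) false) p.2) d)
      count_combinations).items

-- ===== PORT B =====
-- Source B's _fact: r = 1; for i in range(2, n + 1): r *= i
def pvFact (n : Nat) : Int :=
  (List.range' 2 (n - 1)).foldl (fun r i => r * (i : Int)) 1

-- number of orderings of the sorted throw t of length k (Source B's perms computation)
def pvPerms (k : Nat) (t : List Int) : Int :=
  (PySem.List.dedup t).foldl
    (fun pr v => PySem.Int.floordiv pr (pvFact (PySem.List.count t v))) (pvFact k)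

def get_final_combinations_alt (dice_stats : List Int) : List (List Int × Int) :=
  let count_combinations : PySem.Dict (List Int) Int :=
    (pvCWR pvDiceVals pvDice).foldl (fun d t => d.insert t 0) PySem.Dict.empty
  ((PySem.List.enumerate dice_stats).foldl
      (fun d p =>
        (pvCWR pvDiceVals p.1.toNat).foldl
          (fun d throw =>
            pvBump d
              (PySem.List.sorted (throw ++ List.replicate (pvDice - p.1.toNat) 1)
                (fun x => x) false)
              (p.2 * pvPerms p.1.toNat throw)) d)
      count_combinations).items

-- ===== PRECONDITION & SPEC =====
-- Pre_ excludes exactly the inputs where A raises: with 5 or more entries the index-4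
-- pass builds 4-tuples that are not keys of the triple dict, so A raises KeyError.
def Pre_get_final_combinations (dice_stats : List Int) : Prop := dice_stats.length ≤ 4
instance (dice_stats : List Int) : Decidable (Pre_get_final_combinations dice_stats) := by
  unfold Pre_get_final_combinations; infer_instance

def pvWitness_get_final_combinations : List Int := [1, 2, 3]

def Spec_get_final_combinations (dice_stats : List Int) (out : List (List Int × Int)) : Prop :=
  out = get_final_combinations_alt dice_stats
instance (dice_stats : List Int) (out : List (List Int × Int)) :
    Decidable (Spec_get_final_combinations dice_stats out) := by
  unfold Spec_get_final_combinations; infer_instance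

-- ===== CLAIM (what is proved, stated in full; the proofs are below) =====
def Claim_equal_get_final_combinations : Prop :=
  ∀ (dice_stats : List Int), Dom_get_final_combinations dice_stats →
    Pre_get_final_combinations dice_stats →
      Spec_get_final_combinations dice_stats (get_final_combinations dice_stats)

-- ===== LEMMAS AND PROOFS =====

-- pvBump rewritten as a value-map over the items (needs unique keys)
theorem pvBump_items (d : PySem.Dict (List Int) Int) (t : List Int) (c : Int)
    (hn : d.keys.Nodup) :
    (pvBump d t c).items
      = d.items.map (fun kv => (kv.1, kv.2 + if kv.1 = t then c else 0)) := by
  unfold pvBump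
  cases hg : d.get? t with
  | none =>
      have ht : t ∉ d.keys := (PySem.Dict.get?_eq_none_iff_not_mem_keys d t).mp hg
      have : ∀ kv ∈ d.items, (kv.1, kv.2 + if kv.1 = t then c else 0) = kv := by
        intro kv hkv
        have : kv.1 ≠ t := by
          intro h; exact ht (h ▸ PySem.Dict.mem_keys_of_mem_items d hkv)
        simp [this]
      simp only [List.map_congr_left this, List.map_id']
  | some v =>
      have hc : d.contains t := by
        rw [PySem.Dict.contains_eq_isSome_get?, hg]; rfl
      rw [PySem.Dict.items_insert_of_contains d (v + c) hc]
      apply List.map_congr_left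
      intro kv hkv
      by_cases h : kv.1 = t
      · have : d.get? kv.1 = some kv.2 := PySem.Dict.get?_of_mem_items d hkv hn
        rw [h, hg] at this
        have hv : v = kv.2 := by injection this
        simp [h, hv]
      · simp [h]

theorem pvBump_keys (d : PySem.Dict (List Int) Int) (t : List Int) (c : Int)
    (hn : d.keys.Nodup) :
    (pvBump d t c).keys = d.keys := by
  show (pvBump d t c).items.map Prod.fst = d.items.map Prod.fst
  rw [pvBump_items d t c hn, List.map_map]
  rfl

-- a whole loop of bumps 'd[key t] += w t' is one value-map adding the per-key total
theorem foldl_pvBump (L : List (List Int)) (key : List Int → List Int)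
    (w : List Int → Int) (d : PySem.Dict (List Int) Int) (hn : d.keys.Nodup) :
    (L.foldl (fun d t => pvBump d (key t) (w t)) d)
      = PySem.Dict.mk (d.items.map (fun kv =>
          (kv.1, kv.2 + (L.map (fun t => if key t = kv.1 then w t else 0)).sum))) := by
  induction L generalizing d with
  | nil =>
      cases d with
      | mk items => simp
  | cons t L ih =>
      rw [List.foldl_cons]
      have hn' : (pvBump d (key t) (w t)).keys.Nodup := by
        rw [pvBump_keys d (key t) (w t) hn]; exact hn
      rw [ih _ hn', pvBump_items d (key t) (w t) hn, List.map_map]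
      congr 1
      apply List.map_congr_left
      intro kv _
      simp only [Function.comp, List.map_cons, List.sum_cons]
      rw [show (if key t = kv.1 then w t else 0) = (if kv.1 = key t then w t else 0) from
        if_congr eq_comm rfl rfl]
      refine congrArg (Prod.mk kv.1) ?_
      ring

theorem keys_of_mk_map (d : PySem.Dict (List Int) Int)
    (f : List Int × Int → Int) :
    (PySem.Dict.mk (d.items.map (fun kv => (kv.1, f kv)))).keys = d.keys := by
  show (d.items.map (fun kv => (kv.1, f kv))).map Prod.fst = d.items.map Prod.fst
  rw [List.map_map]; rfl

-- factor the constant multiplier out of a guarded sum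
theorem sum_ite_const (L : List (List Int)) (f : List Int → List Int)
    (x : List Int) (c : Int) :
    (L.map (fun t => if f t = x then c else 0)).sum
      = c * (L.map (fun t => if f t = x then (1 : Int) else 0)).sum := by
  induction L with
  | nil => simp
  | cons t L ih =>
      by_cases h : f t = x <;> simp [h, ih, mul_add]

theorem sum_ite_mul (L : List (List Int)) (f : List Int → List Int)
    (x : List Int) (c : Int) (w : List Int → Int) :
    (L.map (fun t => if f t = x then c * w t else 0)).sum
      = c * (L.map (fun t => if f t = x then w t else 0)).sum := by
  induction L with
  | nil => simp
  | cons t L ih =>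
      by_cases h : f t = x <;> simp [h, ih, mul_add]

-- the concrete combinatorial fact: for each pass k = 0..3 and each key of the triple
-- dict, the number of 6^k orderings sorting to that key equals the multinomial-weighted
-- count over the distinct sorted throws
set_option maxRecDepth 100000 in
theorem weights_eq : ∀ k ∈ [0, 1, 2, 3], ∀ x ∈ pvCWR pvDiceVals pvDice,
    ((re_add_ones (get_all_throws k) pvDice).map
        (fun t => if PySem.List.sorted t (fun x => x) false = x then (1 : Int) else 0)).sum
      = ((pvCWR pvDiceVals k).map
          (fun t => if PySem.List.sorted (t ++ List.replicate (pvDice - k) 1)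
              (fun x => x) false = x then pvPerms k t else 0)).sum := by
  decide

set_option maxRecDepth 100000 in
theorem nodup_init :
    ((pvCWR pvDiceVals pvDice).foldl
        (fun d t => d.insert t 0) (PySem.Dict.empty : PySem.Dict (List Int) Int)).keys.Nodup := by
  decide

set_option maxRecDepth 100000 in
theorem keys_init :
    ((pvCWR pvDiceVals pvDice).foldl
        (fun d t => d.insert t 0) (PySem.Dict.empty : PySem.Dict (List Int) Int)).keys
      = pvCWR pvDiceVals pvDice := by
  decide

-- one pass of A equals one pass of B, on any dict whose keys are the triple keys
theorem step_eq (k : Nat) (hk : k ≤ 3) (c : Int) (d : PySem.Dict (List Int) Int)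
    (hn : d.keys.Nodup) (hkeys : d.keys = pvCWR pvDiceVals pvDice) :
    (re_add_ones (get_all_throws k) pvDice).foldl
        (fun d t => pvBump d (PySem.List.sorted t (fun x => x) false) c) d
      = (pvCWR pvDiceVals k).foldl
          (fun d throw =>
            pvBump d
              (PySem.List.sorted (throw ++ List.replicate (pvDice - k) 1) (fun x => x) false)
              (c * pvPerms k throw)) d := by
  rw [foldl_pvBump _ _ _ d hn, foldl_pvBump _ _ _ d hn]
  congr 1
  apply List.map_congr_left
  intro kv hkv
  have hx : kv.1 ∈ pvCWR pvDiceVals pvDice := by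
    rw [← hkeys]
    exact PySem.Dict.mem_keys_of_mem_items d hkv
  have hk4 : k ∈ [0, 1, 2, 3] := by interval_cases k <;> simp
  have hw := weights_eq k hk4 kv.1 hx
  rw [sum_ite_const _ _ _ c, sum_ite_mul _ _ _ c, hw]

-- the outer enumerate loop, by induction with the start index generalized
theorem outer_eq (l : List Int) (i : Int) (hi : 0 ≤ i)
    (d : PySem.Dict (List Int) Int)
    (hn : d.keys.Nodup) (hkeys : d.keys = pvCWR pvDiceVals pvDice)
    (hlen : i.toNat + l.length ≤ 4) :
    (PySem.List.enumerate l i).foldl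
        (fun d p =>
          (re_add_ones (get_all_throws p.1.toNat) pvDice).foldl
            (fun d c => pvBump d (PySem.List.sorted c (fun x => x) false) p.2) d) d
      = (PySem.List.enumerate l i).foldl
          (fun d p =>
            (pvCWR pvDiceVals p.1.toNat).foldl
              (fun d throw =>
                pvBump d
                  (PySem.List.sorted (throw ++ List.replicate (pvDice - p.1.toNat) 1)
                    (fun x => x) false)
                  (p.2 * pvPerms p.1.toNat throw)) d) d := by
  induction l generalizing i d with
  | nil => simp [PySem.List.enumerate_nil]
  | cons a l ih =>
      rw [PySem.List.enumerate_cons, List.foldl_cons, List.foldl_cons]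
      have hk : i.toNat ≤ 3 := by
        simp only [List.length_cons] at hlen; omega
      rw [step_eq i.toNat hk a d hn hkeys]
      set d' := (pvCWR pvDiceVals i.toNat).foldl
          (fun d throw =>
            pvBump d
              (PySem.List.sorted (throw ++ List.replicate (pvDice - i.toNat) 1)
                (fun x => x) false)
              (a * pvPerms i.toNat throw)) d with hd'
      have hmk : d' = PySem.Dict.mk (d.items.map (fun kv =>
          (kv.1, kv.2 + ((pvCWR pvDiceVals i.toNat).map (fun t =>
            if PySem.List.sorted (t ++ List.replicate (pvDice - i.toNat) 1)
                (fun x => x) false = kv.1 then a * pvPerms i.toNat t else 0)).sum))) := by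
        rw [hd', foldl_pvBump _ _ _ d hn]
      have hkeys' : d'.keys = pvCWR pvDiceVals pvDice := by
        rw [hmk, keys_of_mk_map]; exact hkeys
      have hn' : d'.keys.Nodup := by rw [hkeys']; rw [hkeys] at hn; exact hn
      have hlen' : (i + 1).toNat + l.length ≤ 4 := by
        simp only [List.length_cons] at hlen; omega
      exact ih (i + 1) (by omega) d' hn' hkeys' hlen'

-- ===== VERDICT (by name: the statement is the Claim_ definition above) =====
theorem get_final_combinations_spec : Claim_equal_get_final_combinations := by
  intro dice_stats _ hpre
  unfold Spec_get_final_combinations get_final_combinations get_final_combinations_alt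
  have h := outer_eq dice_stats 0 (by omega)
      ((pvCWR pvDiceVals pvDice).foldl (fun d t => d.insert t 0) PySem.Dict.empty)
      nodup_init keys_init (by simpa using hpre)
  simp only [h]
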